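-- pv_equiv track=rewrite | github.com/BoudewijnKlijn/competitive_programming | leetcode/leetcode_2598.py | faster3
-- ===== SOURCE A (Python) =====
-- from typing import List
--
-- def faster3(nums: List[int], value: int) -> int:
--     seen = {remainder: 0 for remainder in range(value)}
--     for num in nums:
--         remainder = num % value
--         seen[remainder] += 1
--
--     ans = len(nums)
--     for rem, count in seen.items():
--         alternative = rem + value * count
--         if alternative < ans:
--             ans = alternative
--     return ans
-- ===== SOURCE B (Python) =====
-- from typing import List
--
--
-- def faster3(nums: List[int], value: int) -> int:
--     # Greedy MEX simulation: count residues once, then consume one copy of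
--     # residue x % value for x = 0, 1, 2, ...; the first x whose residue class
--     # is exhausted is the smallest non-constructible value.
--     cnt = {}
--     for num in nums:
--         r = num % value
--         cnt[r] = cnt.get(r, 0) + 1
--     x = 0
--     while x < len(nums) and cnt.get(x % value, 0) > 0:
--         cnt[x % value] -= 1
--         x += 1
--     return x
-- ===== Notes on version B (the rewrite author's own statement) =====
-- stated objective: alternative
-- what changed: B replaces A's minimization of r + value*count(r) over all residues 0..value-1 by a greedy MEX simulation: it walks x = 0,1,2,... consuming one counted copy of residue x % value per step and returns the first x whose residue class is exhausted, never scanning range(value).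
import Mathlib
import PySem

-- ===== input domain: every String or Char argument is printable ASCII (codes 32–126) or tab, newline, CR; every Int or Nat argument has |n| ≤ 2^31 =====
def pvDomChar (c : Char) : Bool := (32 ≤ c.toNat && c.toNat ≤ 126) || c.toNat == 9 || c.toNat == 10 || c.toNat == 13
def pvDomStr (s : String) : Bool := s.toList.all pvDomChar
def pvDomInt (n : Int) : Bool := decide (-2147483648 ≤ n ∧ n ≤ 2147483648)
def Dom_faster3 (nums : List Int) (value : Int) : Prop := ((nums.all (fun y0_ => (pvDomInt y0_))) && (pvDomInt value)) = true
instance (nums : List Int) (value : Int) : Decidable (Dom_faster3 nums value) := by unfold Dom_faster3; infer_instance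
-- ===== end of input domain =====

-- Alternative algorithm: B replaces A's minimum of r + value*count(r) over all residues by a
-- greedy MEX simulation consuming counted residues for x = 0,1,2,...; equal on Pre_.


-- ===== PORT A =====
-- 'seen[remainder] += 1' raises KeyError when the key is absent; the port's modify-with-default
-- is exact under Pre_faster3, where every remainder is a pre-inserted key.
-- the comprehension '{r: 0 for r in range(value)}' ranges over the distinct keys of range(value),
-- so its items list is exactly the pairs (r, 0) in range order, which Dict.mk builds directly.
def faster3 (nums : List Int) (value : Int) : Int :=
  let seen := PySem.Dict.mk ((PySem.List.pyRange 0 value 1).map (fun r => (r, (0 : Int))))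
  let seen := nums.foldl (fun d num => d.modify (PySem.Int.mod num value) 0 (· + 1)) seen
  let ans := (nums.length : Int)
  seen.items.foldl (fun ans p =>
      if p.1 + value * p.2 < ans then p.1 + value * p.2 else ans) ans

-- ===== PORT B =====
-- the while loop 'while x < len(nums) and cnt.get(x % value, 0) > 0' runs at most len(nums)
-- iterations (x increases by 1 from 0 and the guard bounds it by len(nums)), so the fuel
-- nums.length together with the starting x = 0 encodes the guard 'x < len(nums)' exactly.
-- 'cnt[x % value] -= 1' is modify-with-default, exact here: the key exists since its count is > 0.
def consumeLoop (value : Int) : Nat → PySem.Dict Int Int → Int → Int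
  | 0, _, x => x
  | f + 1, cnt, x =>
    if cnt.getD (PySem.Int.mod x value) 0 > 0 then
      consumeLoop value f (cnt.modify (PySem.Int.mod x value) 0 (· - 1)) (x + 1)
    else x

def faster3_alt (nums : List Int) (value : Int) : Int :=
  let cnt := nums.foldl (fun d num =>
      d.insert (PySem.Int.mod num value) (d.getD (PySem.Int.mod num value) 0 + 1)) PySem.Dict.empty
  consumeLoop value nums.length cnt 0

-- ===== PRECONDITION & SPEC =====
-- Pre_ excludes exactly the inputs where A raises: with value <= 0 and nums nonempty,
-- 'num % value' raises ZeroDivisionError (value = 0) or 'seen[remainder] += 1' raises KeyError.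
def Pre_faster3 (nums : List Int) (value : Int) : Prop := 0 < value ∨ nums = []
instance (nums : List Int) (value : Int) : Decidable (Pre_faster3 nums value) := by unfold Pre_faster3; infer_instance
def pvWitness_faster3 : List Int × Int := ([1, 4, 2], 3)
def Spec_faster3 (nums : List Int) (value : Int) (out : Int) : Prop := out = faster3_alt nums value
instance (nums : List Int) (value : Int) (out : Int) : Decidable (Spec_faster3 nums value out) := by unfold Spec_faster3; infer_instance

-- ===== CLAIM (what is proved, stated in full; the proofs are below) =====
def Claim_equal_faster3 : Prop := ∀ (nums : List Int) (value : Int), Dom_faster3 nums value → Pre_faster3 nums value → Spec_faster3 nums value (faster3 nums value)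

-- ===== LEMMAS AND PROOFS =====

-- the list of remainders, and the candidate value contributed by remainder r
def pvL (nums : List Int) (value : Int) : List Int := nums.map (fun num => PySem.Int.mod num value)
def pvM (nums : List Int) (value : Int) (r : Int) : Int := r + value * ((pvL nums value).count r : Int)

-- every lookup in the all-zeros dict of the comprehension yields 0
theorem pv_getD_mk_zero (R : List Int) (k : Int) :
    (PySem.Dict.mk (R.map (fun r => (r, (0 : Int))))).getD k 0 = 0 := by
  induction R with
  | nil => rfl
  | cons x t ih =>
    rw [List.map_cons, PySem.Dict.getD_eq_get?_getD, PySem.Dict.get?_mk_cons]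
    split_ifs with h
    · rfl
    · rw [← PySem.Dict.getD_eq_get?_getD]
      exact ih

-- A's counting loop: getD after the loop adds the count of the remainder
theorem pv_seen_getD (nums : List Int) (value : Int) (d : PySem.Dict Int Int) (r : Int) :
    (nums.foldl (fun d num => d.modify (PySem.Int.mod num value) 0 (· + 1)) d).getD r 0
      = d.getD r 0 + (((nums.map (fun num => PySem.Int.mod num value)).count r : Nat) : Int) := by
  induction nums generalizing d with
  | nil => simp
  | cons x t ih =>
    simp only [List.foldl_cons, List.map_cons, List.count_cons]
    rw [ih, PySem.Dict.getD_modify]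
    by_cases hk : r = PySem.Int.mod x value
    · subst hk
      simp only [beq_self_eq_true, if_true]
      push_cast
      ring
    · rw [if_neg hk]
      simp [Ne.symm hk]

-- A's counting loop does not add keys when every remainder is already a key
theorem pv_seen_keys (nums : List Int) (value : Int) (d : PySem.Dict Int Int)
    (h : ∀ num ∈ nums, PySem.Int.mod num value ∈ d.keys) :
    (nums.foldl (fun d num => d.modify (PySem.Int.mod num value) 0 (· + 1)) d).keys = d.keys := by
  induction nums generalizing d with
  | nil => rfl
  | cons x t ih =>
    simp only [List.foldl_cons]
    have hk : (d.modify (PySem.Int.mod x value) 0 (· + 1)).keys = d.keys := by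
      rw [PySem.Dict.keys_modify]
      have hc : d.contains (PySem.Int.mod x value) = true :=
        (PySem.Dict.contains_iff_mem_keys _ _).2 (h x (by simp))
      rw [PySem.Dict.keys_insert_of_contains _ _ hc]
    rw [ih _ (fun num hm => by rw [hk]; exact h num (by simp [hm])), hk]

-- min-fold over a projection: bounds and membership, transported from PySem's min-fold lemmas
theorem pv_foldl_min_le (l : List Int) (g : Int → Int) (a : Int) :
    l.foldl (fun x y => min x (g y)) a ≤ a ∧
      ∀ r ∈ l, l.foldl (fun x y => min x (g y)) a ≤ g r := by
  have h := PySem.List.foldl_min_le (l.map g) a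
  rw [List.foldl_map] at h
  exact ⟨h.1, fun r hr => h.2 (g r) (List.mem_map_of_mem hr)⟩

theorem pv_foldl_min_mem (l : List Int) (g : Int → Int) (a : Int) :
    l.foldl (fun x y => min x (g y)) a = a ∨
      ∃ r ∈ l, l.foldl (fun x y => min x (g y)) a = g r := by
  have h := PySem.List.foldl_min_mem (l.map g) a
  rw [List.foldl_map] at h
  rcases h with h | h
  · exact Or.inl h
  · rcases List.mem_map.1 h with ⟨r, hr, he⟩
    exact Or.inr ⟨r, hr, he.symm⟩

-- A's normal form: the running minimum over every remainder 0..value-1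
theorem pv_A_nf (nums : List Int) (value : Int) (hpre : Pre_faster3 nums value) :
    faster3 nums value =
      (PySem.List.pyRange 0 value 1).foldl
        (fun a r => min a (pvM nums value r)) (nums.length : Int) := by
  simp only [faster3]
  have hkeys0 :
      (PySem.Dict.mk ((PySem.List.pyRange 0 value 1).map (fun r => (r, (0 : Int))))).keys
        = PySem.List.pyRange 0 value 1 := by
    simp [PySem.Dict.keys, Function.comp_def]
  have hg0 : ∀ k, (PySem.Dict.mk ((PySem.List.pyRange 0 value 1).map
      (fun r => (r, (0 : Int))))).getD k 0 = 0 :=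
    pv_getD_mk_zero _
  set s0 := PySem.Dict.mk ((PySem.List.pyRange 0 value 1).map (fun r => (r, (0 : Int)))) with hs0
  set s1 := nums.foldl (fun d num => d.modify (PySem.Int.mod num value) 0 (· + 1)) s0 with hs1
  have hkeys : s1.keys = PySem.List.pyRange 0 value 1 := by
    rw [hs1, pv_seen_keys nums value s0 ?_, hkeys0]
    intro num hm
    rw [hkeys0, PySem.List.mem_pyRange_one]
    rcases hpre with hv | hnil
    · exact ⟨PySem.Int.mod_nonneg num hv, PySem.Int.mod_lt num hv⟩
    · exact absurd hm (by simp [hnil])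
  have hnd : s1.keys.Nodup := by rw [hkeys]; exact PySem.List.nodup_pyRange_one _ _
  have hgetD : ∀ r, s1.getD r 0 = ((pvL nums value).count r : Int) := by
    intro r
    rw [hs1, pv_seen_getD, hg0]
    simp [pvL]
  rw [PySem.Dict.items_eq_map_keys s1 hnd 0, List.foldl_map, hkeys]
  refine PySem.List.foldl_congr_mem _ _ _ _ (fun acc r _ => ?_)
  simp only [hgetD r, pvM]
  omega

-- an integer multiple of v lying strictly between -v and v is zero
theorem pv_bounded_mul (v a t : Int) (hv : 0 < v) (h1 : -v < a) (h2 : a < v)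
    (he : a = v * t) : a = 0 ∧ t = 0 := by
  rcases lt_trichotomy t 0 with h | h | h
  · have : v * t ≤ v * (-1) := mul_le_mul_of_nonneg_left (by omega) hv.le
    omega
  · subst h; omega
  · have : v * 1 ≤ v * t := mul_le_mul_of_nonneg_left (by omega) hv.le
    omega

-- B's loop invariant run: starting at x with fuel n - x, the dict holding, for each residue r,
-- count(r) minus the number q_r of copies already consumed (where r + value*q_r is the next
-- uncovered value of class r, lying in [x, x+value)), the loop returns A's minimum Astar.
theorem pv_run (nums : List Int) (value : Int) (hv : 0 < value)
    (f : Nat) (x : Int) (cnt : PySem.Dict Int Int)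
    (hx0 : 0 ≤ x)
    (hxA : x ≤ (PySem.List.pyRange 0 value 1).foldl
        (fun a r => min a (pvM nums value r)) (nums.length : Int))
    (hfx : x + (f : Int) = (nums.length : Int))
    (hinv : ∀ r : Int, 0 ≤ r → r < value → ∃ q : Int, 0 ≤ q ∧
        cnt.getD r 0 = ((pvL nums value).count r : Int) - q ∧
        x ≤ r + value * q ∧ r + value * q < x + value) :
    consumeLoop value f cnt x =
      (PySem.List.pyRange 0 value 1).foldl
        (fun a r => min a (pvM nums value r)) (nums.length : Int) := by
  induction f generalizing x cnt with
  | zero =>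
    have hle := (pv_foldl_min_le (PySem.List.pyRange 0 value 1) (pvM nums value)
        ((nums.length : Int))).1
    simp only [consumeLoop]
    omega
  | succ f ih =>
    set Astar := (PySem.List.pyRange 0 value 1).foldl
        (fun a r => min a (pvM nums value r)) (nums.length : Int) with hAdef
    set s := PySem.Int.mod x value with hsdef
    have hs0 : 0 ≤ s := PySem.Int.mod_nonneg x hv
    have hs1 : s < value := PySem.Int.mod_lt x hv
    have hdecomp : PySem.Int.floordiv x value * value + s = x :=
      PySem.Int.floordiv_mul_add_mod x value
    obtain ⟨q, hq0, hgd, hq1, hq2⟩ := hinv s hs0 hs1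
    -- the next uncovered value of x's own residue class is x itself
    have hx : s + value * q = x := by
      have he : s + value * q - x = value * (q - PySem.Int.floordiv x value) := by
        linear_combination hdecomp
      have := pv_bounded_mul value (s + value * q - x) (q - PySem.Int.floordiv x value)
        hv (by omega) (by omega) he
      omega
    simp only [consumeLoop, ← hsdef]
    rcases eq_or_lt_of_le hxA with heq | hlt
    · -- x = Astar: since fuel remains, Astar < len(nums), so Astar is a candidate and its
      -- class is exhausted: the guard fails and the loop returns x.
      have hAn : Astar < (nums.length : Int) := by push_cast at hfx ⊢; omega
      rcases pv_foldl_min_mem (PySem.List.pyRange 0 value 1) (pvM nums value)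
          ((nums.length : Int)) with hA | ⟨r₀, hr₀R, hA⟩
      · rw [← hAdef] at hA; omega
      · rw [← hAdef] at hA
        obtain ⟨hr₀0, hr₀1⟩ := PySem.List.mem_pyRange_one.1 hr₀R
        have hc₀ : (0 : Int) ≤ ((pvL nums value).count r₀ : Int) := by positivity
        have hxr : x = r₀ + value * ((pvL nums value).count r₀ : Int) := by
          rw [heq, hA]; rfl
        have hsum : r₀ + value * ((pvL nums value).count r₀ : Int) = s + value * q := by
          linarith [hxr, hx]
        have he : r₀ - s = value * (q - ((pvL nums value).count r₀ : Int)) := by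
          linear_combination hsum
        obtain ⟨hz1, hz2⟩ := pv_bounded_mul value (r₀ - s)
          (q - ((pvL nums value).count r₀ : Int)) hv (by omega) (by omega) he
        have hrs : r₀ = s := by omega
        have hcond : ¬ (cnt.getD s 0 > 0) := by
          rw [hgd, ← hrs]
          omega
        rw [if_neg hcond]
        omega
    · -- x < Astar: x's class still has copies left; consume one and continue.
      have hsR : s ∈ PySem.List.pyRange 0 value 1 := PySem.List.mem_pyRange_one.2 ⟨hs0, hs1⟩
      have hAs := (pv_foldl_min_le (PySem.List.pyRange 0 value 1) (pvM nums value)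
          ((nums.length : Int))).2 s hsR
      rw [← hAdef, pvM] at hAs
      have hqc : q < ((pvL nums value).count s : Int) := by
        by_contra hge
        have : value * ((pvL nums value).count s : Int) ≤ value * q :=
          mul_le_mul_of_nonneg_left (by omega) hv.le
        omega
      have hcond : cnt.getD s 0 > 0 := by rw [hgd]; omega
      rw [if_pos hcond]
      refine ih (x + 1) _ (by omega) (by omega) (by push_cast at hfx ⊢; omega) ?_
      intro r hr0 hr1
      obtain ⟨qr, hqr0, hqrgd, hqr1, hqr2⟩ := hinv r hr0 hr1
      by_cases hres : r = s
      · subst hres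
        have h1 : s + value * (q + 1) = x + value := by linear_combination hx
        refine ⟨q + 1, by omega, ?_, by omega, by omega⟩
        rw [PySem.Dict.getD_modify, if_pos rfl, hgd]
        ring
      · refine ⟨qr, hqr0, ?_, ?_, by omega⟩
        · rw [PySem.Dict.getD_modify, if_neg hres]
          exact hqrgd
        · -- r + value*qr ≠ x, since x belongs to residue class s ≠ r
          rcases eq_or_lt_of_le hqr1 with heq2 | h
          · exfalso
            have hsum : r + value * qr = s + value * q := by linarith [heq2, hx]
            have he : r - s = value * (q - qr) := by linear_combination hsum
            obtain ⟨hz1, hz2⟩ := pv_bounded_mul value (r - s) (q - qr) hv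
              (by omega) (by omega) he
            omega
          · omega

-- ===== VERDICT (by name: the statement is the Claim_ definition above) =====
theorem faster3_spec : Claim_equal_faster3 := by
  intro nums value _ hpre
  unfold Spec_faster3
  rcases hpre with hv | hnil
  · rw [pv_A_nf nums value (Or.inl hv)]
    simp only [faster3_alt]
    have hcnt : nums.foldl (fun d num =>
        d.insert (PySem.Int.mod num value) (d.getD (PySem.Int.mod num value) 0 + 1))
          PySem.Dict.empty
        = PySem.Dict.counter (pvL nums value) := by
      rw [← PySem.Dict.foldl_insert_getD_add_one_eq_counter (pvL nums value)]
      simp only [pvL, List.foldl_map]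
    have h0A : (0 : Int) ≤ (PySem.List.pyRange 0 value 1).foldl
        (fun a r => min a (pvM nums value r)) (nums.length : Int) := by
      rcases pv_foldl_min_mem (PySem.List.pyRange 0 value 1) (pvM nums value)
          ((nums.length : Int)) with hA | ⟨r, hrR, hA⟩
      · rw [hA]; positivity
      · rw [hA, pvM]
        obtain ⟨hr0, _⟩ := PySem.List.mem_pyRange_one.1 hrR
        have : (0 : Int) ≤ ((pvL nums value).count r : Int) := by positivity
        nlinarith
    rw [hcnt]
    refine (pv_run nums value hv nums.length 0 _ le_rfl h0A (by omega) ?_).symm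
    intro r hr0 hr1
    exact ⟨0, le_rfl, by rw [PySem.Dict.getD_counter]; ring, by omega, by omega⟩
  · subst hnil
    have hle : value ≤ 0 ∨ 0 < value := by omega
    rcases hle with h | h
    · simp [faster3, faster3_alt, consumeLoop, PySem.List.pyRange_one_eq_nil h]
    · rw [pv_A_nf [] value (Or.inr rfl)]
      simp only [faster3_alt, List.foldl_nil, List.length_nil, consumeLoop]
      have hb := (pv_foldl_min_le (PySem.List.pyRange 0 value 1) (pvM [] value) 0).1
      have h0A : (0 : Int) ≤ (PySem.List.pyRange 0 value 1).foldl
          (fun a r => min a (pvM [] value r)) 0 := by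
        rcases pv_foldl_min_mem (PySem.List.pyRange 0 value 1) (pvM [] value) 0
            with hA | ⟨r, hrR, hA⟩
        · omega
        · rw [hA, pvM]
          obtain ⟨hr0, _⟩ := PySem.List.mem_pyRange_one.1 hrR
          have : (0 : Int) ≤ ((pvL [] value).count r : Int) := by positivity
          nlinarith
      push_cast
      omega
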